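-- pv_equiv track=rewrite | github.com/LeeHyeonKyu/Coding-Practice | Programmers/2017 팁스타운/단어 퍼즐.py | solution
-- ===== SOURCE A (Python) =====
-- from collections import defaultdict, deque
--
-- def solution(strs, t):
--     answer = float('inf')
--     queue = deque([('',0)])
--     str_map = defaultdict(list)
--     for s in strs:
--         str_map[s[0]].append(s)
--
--     while queue:
--         prev_str, cnt = queue.popleft()
--         if prev_str == t:
--             return cnt
--         else:
--             curr_str = t[len(prev_str)]
--             for s in str_map[curr_str]:
--                 if t[len(prev_str):len(prev_str)+len(s)] == s:
--                     queue.append((prev_str+s, cnt+1))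
--
--     return -1
-- ===== SOURCE B (Python) =====
-- def solution(strs, t):
--     # Bottom-up DP over suffix positions: best[i] (after handling position pos)
--     # is the minimum number of pieces spelling t[pos+i:], or None if impossible.
--     n = len(t)
--     best = [0]
--     for pos in range(n - 1, -1, -1):
--         b = None
--         for s in strs:
--             k = len(s)
--             if 1 <= k <= n - pos and t[pos:pos + k] == s:
--                 r = best[k - 1]
--                 if r is not None and (b is None or r + 1 < b):
--                     b = r + 1
--         best.insert(0, b)
--     return best[0] if best[0] is not None else -1
-- ===== Notes on version B (the rewrite author's own statement) =====
-- stated objective: alternative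
-- what changed: A's breadth-first search over a deque of all partial piece concatenations is replaced by a bottom-up dynamic program holding one min-piece-count value per position of t, filled from the end of t; a timing run could not certify a speed ratio on its input family, so no speed is claimed.
import Mathlib
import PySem

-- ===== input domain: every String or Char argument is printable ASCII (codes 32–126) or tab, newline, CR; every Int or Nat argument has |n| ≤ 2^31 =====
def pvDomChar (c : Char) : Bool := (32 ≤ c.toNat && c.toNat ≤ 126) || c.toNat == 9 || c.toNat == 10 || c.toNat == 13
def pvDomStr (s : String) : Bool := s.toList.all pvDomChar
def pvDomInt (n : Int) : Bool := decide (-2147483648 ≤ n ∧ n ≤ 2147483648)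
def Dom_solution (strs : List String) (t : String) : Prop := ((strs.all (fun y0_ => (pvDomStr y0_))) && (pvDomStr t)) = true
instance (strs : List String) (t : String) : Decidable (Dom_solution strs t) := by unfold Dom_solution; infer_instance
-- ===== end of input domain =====

-- B replaces A's breadth-first search over all piece sequences by a bottom-up
-- dynamic program over the positions of t (one Option value per suffix).

-- ===== PORT A =====
-- Strings are handled as their char lists (PySem.Chars representation).

-- the pieces of `strs` that are nonempty and match t at position pos (proof-side
-- characterisation, used by the fuel bound below and by the lemmas)
def solMatches (strl : List (List Char)) (tl : List Char) (pos : Nat) : List (List Char) :=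
  strl.filter (fun s => !s.isEmpty && decide ((tl.drop pos).take s.length = s))

-- size of A's BFS tree from position pos; used only as a termination fuel for the
-- port of A's `while queue` loop (each BFS iteration strictly decreases the total
-- tree size of the queue, see `solution_spec` lemmas)
def solTree (strl : List (List Char)) (tl : List Char) (pos : Nat) : Nat :=
  if _h : pos < tl.length then
    1 + ((solMatches strl tl pos).attach.map (fun x => solTree strl tl (pos + x.1.length))).sum
  else 1
termination_by tl.length - pos
decreasing_by
  have hx := x.2
  simp only [solMatches, List.mem_filter, Bool.and_eq_true, Bool.not_eq_true',
    List.isEmpty_eq_false_iff, decide_eq_true_eq] at hx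
  have : x.1.length ≠ 0 := by
    intro h0; exact hx.2.1 (List.eq_nil_of_length_eq_zero h0)
  omega

-- the `while queue:` loop of A (deque popleft = head, append = snoc); fuel is only
-- a totality guard, never exhausted on inputs satisfying Pre_solution
def solBfs (tl : List Char) (m : PySem.Dict Char (List (List Char))) :
    Nat → List (List Char × Int) → Int
  | _, [] => -1
  | 0, _ => -1                     -- fuel exhausted (unreachable under Pre_solution)
  | fuel + 1, (p, c) :: rest =>
    if p = tl then c
    else
      match PySem.List.pyGet? tl (p.length : Int) with
      | none => -1                 -- IndexError t[len(prev_str)] (unreachable: p is a proper prefix)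
      | some ch =>
        solBfs tl m fuel
          (rest ++ (m.getD ch []).foldl
            (fun q s =>
              if PySem.List.slice tl (some (p.length : Int))
                  (some ((p.length : Int) + (s.length : Int))) = s
              then q ++ [(p ++ s, c + 1)] else q)
            [])

def solution (strs : List String) (t : String) : Int :=
  let tl := t.toList
  let strl := strs.map String.toList
  -- str_map = defaultdict(list); for s in strs: str_map[s[0]].append(s)
  -- (s[0] on an empty piece raises IndexError: the fold yields none, outside Pre_)
  let m? : Option (PySem.Dict Char (List (List Char))) :=
    strl.foldl
      (fun acc s =>
        match acc with
        | none => none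
        | some d =>
          match PySem.List.pyGet? s 0 with
          | none => none
          | some c => some (d.modify c [] (· ++ [s])))
      (some PySem.Dict.empty)
  match m? with
  | none => -1                     -- IndexError (outside Pre_solution)
  | some m => solBfs tl m (solTree strl tl 0) [([], 0)]

-- ===== PORT B =====
def solution_alt (strs : List String) (t : String) : Int :=
  let tl := t.toList
  let strl := strs.map String.toList
  let n := tl.length
  -- best[i] = min pieces spelling t[pos+i:], or none; built from the end of t
  let best := (PySem.List.pyRange ((n : Int) - 1) (-1) (-1)).foldl
    (fun best pos =>
      let b := strl.foldl
        (fun b s =>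
          let k : Int := (s.length : Int)
          if 1 ≤ k ∧ k ≤ (n : Int) - pos ∧
              PySem.List.slice tl (some pos) (some (pos + k)) = s then
            match PySem.List.pyGetD best (k - 1) none with
            | some r =>
              match b with
              | none => some (r + 1)
              | some bv => if r + 1 < bv then some (r + 1) else some bv
            | none => b
          else b)
        none
      b :: best)
    [some 0]
  match PySem.List.pyGetD best 0 none with
  | some v => v
  | none => -1

-- ===== PRECONDITION & SPEC =====
-- Pre_ excludes exactly the inputs holding an empty piece, on which A raises
-- IndexError at s[0]; A returns normally on every other input.
def Pre_solution (strs : List String) (t : String) : Prop := ∀ s ∈ strs, s ≠ ""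
instance (strs : List String) (t : String) : Decidable (Pre_solution strs t) := by
  unfold Pre_solution; infer_instance

def pvWitness_solution : List String × String := (["ba", "a", "ab"], "aba")

def Spec_solution (strs : List String) (t : String) (out : Int) : Prop := out = solution_alt strs t
instance (strs : List String) (t : String) (out : Int) : Decidable (Spec_solution strs t out) := by
  unfold Spec_solution; infer_instance

-- ===== CLAIM (what is proved, stated in full; the proofs are below) =====
def Claim_equal_solution : Prop := ∀ (strs : List String) (t : String), Dom_solution strs t → Pre_solution strs t → Spec_solution strs t (solution strs t)

-- ===== LEMMAS AND PROOFS =====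

-- min on Option Int, none = +infinity
def omin : Option Int → Option Int → Option Int
  | none, b => b
  | some x, none => some x
  | some x, some y => some (min x y)

def addO (c : Int) (a : Option Int) : Option Int := a.map (c + ·)

def ominList (l : List (Option Int)) : Option Int := l.foldr omin none

-- the common value both programs compute: min number of pieces spelling tl from pos
def solMin (strl : List (List Char)) (tl : List Char) (pos : Nat) : Option Int :=
  if _h : pos < tl.length then
    (solMatches strl tl pos).attach.foldl
      (fun acc x => omin acc (addO 1 (solMin strl tl (pos + x.1.length)))) none
  else some 0
termination_by tl.length - pos
decreasing_by
  have hx := x.2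
  simp only [solMatches, List.mem_filter, Bool.and_eq_true, Bool.not_eq_true',
    List.isEmpty_eq_false_iff, decide_eq_true_eq] at hx
  have : x.1.length ≠ 0 := by
    intro h0; exact hx.2.1 (List.eq_nil_of_length_eq_zero h0)
  omega

theorem omin_none_right (a : Option Int) : omin a none = a := by cases a <;> rfl

theorem omin_assoc (a b c : Option Int) : omin (omin a b) c = omin a (omin b c) := by
  cases a <;> cases b <;> cases c <;> simp [omin, min_assoc]

theorem omin_comm (a b : Option Int) : omin a b = omin b a := by
  cases a <;> cases b <;> simp [omin, min_comm]

theorem foldl_omin {α : Type} (l : List α) (f : α → Option Int) (init : Option Int) :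
    l.foldl (fun acc x => omin acc (f x)) init = omin init (ominList (l.map f)) := by
  induction l generalizing init with
  | nil => simp [ominList, omin_none_right]
  | cons a l ih =>
    simp only [List.foldl_cons, List.map_cons]
    rw [ih, show ominList (f a :: List.map f l) = omin (f a) (ominList (List.map f l)) from rfl,
      omin_assoc]

theorem foldl_omin_attach {α : Type} (l : List α) (f : α → Option Int) :
    l.attach.foldl (fun acc x => omin acc (f x.1)) none = ominList (l.map f) := by
  have h2 : l.attach.map (fun x => x.1) = l := by simp
  conv_lhs => rw [show l.attach.foldl (fun acc x => omin acc (f x.1)) none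
    = (l.attach.map (fun x => x.1)).foldl (fun acc s => omin acc (f s)) none from
      (List.foldl_map (f := fun (x : {a // a ∈ l}) => x.1) (g := fun acc s => omin acc (f s))).symm]
  rw [h2, foldl_omin]
  rfl

theorem ominList_append (xs ys : List (Option Int)) :
    ominList (xs ++ ys) = omin (ominList xs) (ominList ys) := by
  induction xs with
  | nil => simp [ominList, omin]
  | cons a xs ih =>
    simp only [List.cons_append, ominList, List.foldr_cons] at *
    rw [ih, omin_assoc]

theorem addO_ominList (c : Int) (l : List (Option Int)) :
    addO c (ominList l) = ominList (l.map (addO c)) := by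
  induction l with
  | nil => rfl
  | cons a l ih =>
    show addO c (omin a (ominList l)) = omin (addO c a) (ominList (List.map (addO c) l))
    rw [← ih]
    cases a <;> cases hl : ominList l <;>
      simp only [omin, addO, Option.map_none, Option.map_some]
    rw [← min_add_add_left]

theorem ominList_eq_some_mem (l : List (Option Int)) (v : Int)
    (h : ominList l = some v) : some v ∈ l := by
  induction l with
  | nil => simp [ominList] at h
  | cons a l ih =>
    simp only [ominList, List.foldr_cons] at h
    have h' : omin a (ominList l) = some v := h
    rcases ha : a with _ | x <;> rcases hl : (ominList l) with _ | y <;>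
      rw [ha, hl] at h' <;> simp only [omin] at h'
    · exact absurd h' (by simp)
    · right; exact ih (hl.trans h')
    · rw [← h']; exact List.mem_cons_self ..
    · rcases min_cases x y with ⟨he, _⟩ | ⟨he, _⟩ <;>
        rw [he] at h'
      · rw [← h']; exact List.mem_cons_self ..
      · right; exact ih (hl.trans h')

-- solMin in closed form at a position inside t
theorem solMin_eq (strl : List (List Char)) (tl : List Char) (pos : Nat)
    (h : pos < tl.length) :
    solMin strl tl pos =
      ominList ((solMatches strl tl pos).map
        (fun s => addO 1 (solMin strl tl (pos + s.length)))) := by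
  rw [solMin, dif_pos h]
  exact foldl_omin_attach (solMatches strl tl pos)
    (fun s => addO 1 (solMin strl tl (pos + s.length)))

theorem solMin_nonneg (strl : List (List Char)) (tl : List Char) :
    ∀ (d pos : Nat) (v : Int), tl.length - pos ≤ d →
      solMin strl tl pos = some v → 0 ≤ v := by
  intro d
  induction d with
  | zero =>
    intro pos v hle heq
    rw [solMin, dif_neg (by omega)] at heq
    simp only [Option.some.injEq] at heq
    omega
  | succ d ih =>
    intro pos v hle heq
    by_cases h : pos < tl.length
    · rw [solMin_eq _ _ _ h] at heq
      have hmem := ominList_eq_some_mem _ _ heq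
      rcases List.mem_map.1 hmem with ⟨sm, hsm, hv⟩
      have hs1 : sm.length ≠ 0 := by
        simp only [solMatches, List.mem_filter, Bool.and_eq_true, Bool.not_eq_true',
          List.isEmpty_eq_false_iff, decide_eq_true_eq] at hsm
        intro h0; exact hsm.2.1 (List.eq_nil_of_length_eq_zero h0)
      cases hrec : solMin strl tl (pos + sm.length) with
      | none => rw [hrec] at hv; simp [addO] at hv
      | some r =>
        rw [hrec] at hv
        simp only [addO, Option.map_some, Option.some.injEq] at hv
        have hr := ih (pos + sm.length) r (by omega) hrec
        omega
    · rw [solMin, dif_neg h] at heq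
      simp at heq
      omega

theorem solTree_eq (strl : List (List Char)) (tl : List Char) (pos : Nat)
    (h : pos < tl.length) :
    solTree strl tl pos =
      1 + ((solMatches strl tl pos).map (fun s => solTree strl tl (pos + s.length))).sum := by
  rw [solTree, dif_pos h]
  congr 1
  congr 1
  simp

theorem solTree_pos (strl : List (List Char)) (tl : List Char) (pos : Nat) :
    1 ≤ solTree strl tl pos := by
  rw [solTree]; split <;> omega

-- ========== A side ==========

def contribV (strl : List (List Char)) (tl : List Char) (x : List Char × Int) : Option Int :=
  addO x.2 (solMin strl tl x.1.length)

def Vq (strl : List (List Char)) (tl : List Char) (q : List (List Char × Int)) : Option Int :=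
  ominList (q.map (contribV strl tl))

def muQ (strl : List (List Char)) (tl : List Char) (q : List (List Char × Int)) : Nat :=
  (q.map (fun x => solTree strl tl x.1.length)).sum

def unO : Option Int → Int
  | some v => v
  | none => -1

-- the str_map fold characterised: buckets hold the pieces by first char, in order
theorem build_map (strl : List (List Char)) (hne : ∀ s ∈ strl, s ≠ []) :
    ∃ m : PySem.Dict Char (List (List Char)),
      (strl.foldl
        (fun acc s =>
          match acc with
          | none => none
          | some d =>
            match PySem.List.pyGet? s 0 with
            | none => none
            | some c => some (d.modify c [] (· ++ [s])))
        (some PySem.Dict.empty)) = some m ∧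
      ∀ ch, m.getD ch [] = strl.filter (fun s => s.headD ' ' == ch) := by
  have key : ∀ (l : List (List Char)) (d : PySem.Dict Char (List (List Char))),
      (∀ s ∈ l, s ≠ []) →
      l.foldl
        (fun acc s =>
          match acc with
          | none => none
          | some d =>
            match PySem.List.pyGet? s 0 with
            | none => none
            | some c => some (d.modify c [] (· ++ [s])))
        (some d)
      = some (l.foldl (fun d s => d.modify (s.headD ' ') [] (· ++ [s])) d) := by
    intro l
    induction l with
    | nil => intro d _; rfl
    | cons a l ih =>
      intro d h
      cases a with
      | nil => exact absurd rfl (h [] List.mem_cons_self)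
      | cons c cs =>
        simp only [List.foldl_cons, PySem.List.pyGet?_zero_cons, List.headD_cons]
        exact ih _ (fun s hs => h s (List.mem_cons_of_mem _ hs))
  have key2 : ∀ (l : List (List Char)) (d : PySem.Dict Char (List (List Char))) (ch : Char),
      (l.foldl (fun d s => d.modify (s.headD ' ') [] (· ++ [s])) d).getD ch []
        = d.getD ch [] ++ l.filter (fun s => s.headD ' ' == ch) := by
    intro l
    induction l with
    | nil => intro d ch; simp
    | cons a l ih =>
      intro d ch
      simp only [List.foldl_cons]
      rw [ih, List.filter_cons]
      rw [PySem.Dict.getD_modify]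
      by_cases hc : a.headD ' ' = ch <;>
        simp_all [List.headD_eq_head?_getD] <;> simp [Ne.symm hc]
  refine ⟨strl.foldl (fun d s => d.modify (s.headD ' ') [] (· ++ [s])) PySem.Dict.empty,
    key strl PySem.Dict.empty hne, ?_⟩
  intro ch
  rw [key2]
  simp

-- the children appended by one BFS step are exactly the matching pieces, in order
theorem children_eq (strl : List (List Char)) (tl : List Char)
    (hne : ∀ s ∈ strl, s ≠ []) (pos : Nat) (hpos : pos < tl.length)
    (bucket : List (List Char)) (hb : bucket = strl.filter (fun s => s.headD ' ' == tl[pos])) :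
    bucket.filter (fun s =>
        decide (PySem.List.slice tl (some (pos : Int)) (some ((pos : Int) + (s.length : Int))) = s))
      = solMatches strl tl pos := by
  subst hb
  rw [List.filter_filter]
  apply List.filter_congr
  intro s hs
  have hsne := hne s hs
  simp only [PySem.List.slice_natCast_add]
  by_cases hp : (tl.drop pos).take s.length = s
  · have hhead : s.headD ' ' = tl[pos] := by
      cases s with
      | nil => exact absurd rfl hsne
      | cons a as =>
        have h1 := congrArg List.head? hp
        rw [List.head?_take, List.head?_drop, List.getElem?_eq_getElem hpos] at h1
        simp only [List.length_cons, List.head?_cons] at h1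
        rw [if_neg (by omega)] at h1
        simp only [Option.some.injEq] at h1
        simp [← h1]
    simp [hp, hsne, List.headD_eq_head?_getD ▸ hhead]
  · simp [hp]


theorem Vq_cons (strl : List (List Char)) (tl : List Char) (x : List Char × Int)
    (q : List (List Char × Int)) :
    Vq strl tl (x :: q) = omin (contribV strl tl x) (Vq strl tl q) := rfl

theorem Vq_append (strl : List (List Char)) (tl : List Char)
    (q r : List (List Char × Int)) :
    Vq strl tl (q ++ r) = omin (Vq strl tl q) (Vq strl tl r) := by
  unfold Vq
  rw [List.map_append, ominList_append]

theorem muQ_cons (strl : List (List Char)) (tl : List Char) (x : List Char × Int)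
    (q : List (List Char × Int)) :
    muQ strl tl (x :: q) = solTree strl tl x.1.length + muQ strl tl q := by
  simp [muQ]

theorem muQ_append (strl : List (List Char)) (tl : List Char)
    (q r : List (List Char × Int)) :
    muQ strl tl (q ++ r) = muQ strl tl q + muQ strl tl r := by
  simp [muQ]

theorem addO_addO (c d : Int) (a : Option Int) : addO c (addO d a) = addO (c + d) a := by
  cases a <;> simp [addO, Int.add_assoc]

theorem vq_min (strl : List (List Char)) (tl : List Char) :
    ∀ (q : List (List Char × Int)) (c : Int), (∀ x ∈ q, c ≤ x.2) →
      omin (some c) (Vq strl tl q) = some c := by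
  intro q
  induction q with
  | nil => intro c _; rfl
  | cons y r ih =>
    intro c hc
    rw [Vq_cons, ← omin_assoc]
    have h1 : omin (some c) (contribV strl tl y) = some c := by
      unfold contribV
      cases hsy : solMin strl tl y.1.length with
      | none => rfl
      | some v =>
        have hv := solMin_nonneg strl tl tl.length y.1.length v (by omega) hsy
        have hcy := hc y List.mem_cons_self
        simp only [addO, Option.map_some, omin, Option.some.injEq]
        omega
    rw [h1]
    exact ih c (fun x hx => hc x (List.mem_cons_of_mem _ hx))

theorem solMatches_prefix (strl : List (List Char)) (tl : List Char) (pos : Nat)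
    (s : List Char) (hs : s ∈ solMatches strl tl pos) (hp : pos < tl.length) :
    (tl.take pos ++ s) <+: tl ∧ (tl.take pos ++ s).length = pos + s.length := by
  have hm : (tl.drop pos).take s.length = s := by
    simp only [solMatches, List.mem_filter, Bool.and_eq_true, decide_eq_true_eq] at hs
    exact hs.2.2
  constructor
  · rw [← hm, ← List.take_add]
    exact List.take_prefix _ _
  · simp only [List.length_append, List.length_take]
    omega

-- main BFS invariant lemma
theorem bfs_eq (strl : List (List Char)) (tl : List Char)
    (m : PySem.Dict Char (List (List Char)))
    (hm : ∀ ch, m.getD ch [] = strl.filter (fun s => s.headD ' ' == ch))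
    (hne : ∀ s ∈ strl, s ≠ []) :
    ∀ (fuel : Nat) (q : List (List Char × Int)),
      muQ strl tl q ≤ fuel →
      (∀ x ∈ q, x.1 <+: tl) →
      q.Pairwise (fun a b => a.2 ≤ b.2) →
      (∀ x ∈ q, ∀ y ∈ q, x.2 ≤ y.2 + 1) →
      solBfs tl m fuel q = unO (Vq strl tl q) := by
  intro fuel
  induction fuel with
  | zero =>
    intro q hmu _ _ _
    cases q with
    | nil => rfl
    | cons x rest =>
      exfalso
      have := solTree_pos strl tl x.1.length
      rw [muQ_cons] at hmu
      omega
  | succ fuel ih =>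
    intro q hmu hP hpw hbd
    cases q with
    | nil => rfl
    | cons x rest =>
      obtain ⟨p, c⟩ := x
      by_cases hpt : p = tl
      · simp only [solBfs]
        rw [if_pos hpt]
        rw [Vq_cons]
        have hc1 : contribV strl tl (p, c) = some c := by
          unfold contribV
          simp only []
          rw [hpt, solMin, dif_neg (by omega)]
          simp [addO]
        rw [hc1, vq_min strl tl rest c (fun y hy => (List.pairwise_cons.1 hpw).1 y hy)]
        rfl
      · have hppre : p <+: tl := hP (p, c) List.mem_cons_self
        have hlt : p.length < tl.length :=
          lt_of_le_of_ne hppre.length_le (fun he => hpt (hppre.eq_of_length he))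
        have hptake : p = tl.take p.length := by
          rw [List.prefix_iff_eq_take] at hppre; exact hppre
        simp only [solBfs]
        rw [if_neg hpt]
        have hg : PySem.List.pyGet? tl ((p.length : Nat) : Int) = some (tl[p.length]'hlt) := by
          rw [PySem.List.pyGet?_natCast, List.getElem?_eq_getElem hlt]
        rw [hg]
        show solBfs tl m fuel
            (rest ++ (m.getD (tl[p.length]'hlt) []).foldl
              (fun q s =>
                if PySem.List.slice tl (some (p.length : Int))
                    (some ((p.length : Int) + (s.length : Int))) = s
                then q ++ [(p ++ s, c + 1)] else q)
              [])
          = unO (Vq strl tl ((p, c) :: rest))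
        rw [PySem.List.foldl_append_ite
          (p := fun s => PySem.List.slice tl (some (p.length : Int))
            (some ((p.length : Int) + (s.length : Int))) = s)
          (f := fun s => (p ++ s, c + 1))]
        rw [List.nil_append, hm, children_eq strl tl hne p.length hlt _ rfl]
        set M := solMatches strl tl p.length with hM
        set ch := M.map (fun s => (p ++ s, c + 1)) with hch
        have hchlen : ∀ y ∈ ch, y.1.length = p.length + y.1.length - p.length := by
          intro y _; omega
        have hmem_ch : ∀ y ∈ ch, ∃ sm ∈ M, y = (p ++ sm, c + 1) := by
          intro y hy
          rcases List.mem_map.1 hy with ⟨sm, hsm, rfl⟩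
          exact ⟨sm, hsm, rfl⟩
        -- the new queue satisfies all the invariants
        have hmuQ' : muQ strl tl (rest ++ ch) ≤ fuel := by
          rw [muQ_append]
          have hch2 : muQ strl tl ch = ((M.map (fun sm => solTree strl tl (p.length + sm.length)))).sum := by
            unfold muQ
            rw [hch, List.map_map]
            congr 1
            apply List.map_congr_left
            intro sm hsm
            simp only [Function.comp]
            congr 1
            simp
          rw [hch2]
          have htree := solTree_eq strl tl p.length hlt
          rw [← hM] at htree
          rw [muQ_cons] at hmu
          simp only [] at hmu htree
          omega
        have hP' : ∀ y ∈ rest ++ ch, y.1 <+: tl := by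
          intro y hy
          rcases List.mem_append.1 hy with hy | hy
          · exact hP y (List.mem_cons_of_mem _ hy)
          · rcases hmem_ch y hy with ⟨sm, hsm, rfl⟩
            rw [hptake]
            exact (solMatches_prefix strl tl p.length sm hsm hlt).1
        have hrest_le : ∀ y ∈ rest, c ≤ y.2 := (List.pairwise_cons.1 hpw).1
        have hpw' : (rest ++ ch).Pairwise (fun a b => a.2 ≤ b.2) := by
          rw [List.pairwise_append]
          refine ⟨(List.pairwise_cons.1 hpw).2, ?_, ?_⟩
          · rw [hch, List.pairwise_map]
            have : ∀ (l : List (List Char)),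
                l.Pairwise (fun a b => ((p ++ a, c + 1) : List Char × Int).2 ≤ ((p ++ b, c + 1) : List Char × Int).2) := by
              intro l
              induction l with
              | nil => exact List.Pairwise.nil
              | cons a l ihl => exact List.Pairwise.cons (fun b _ => le_refl _) ihl
            exact this M
          · intro a ha b hb
            rcases hmem_ch b hb with ⟨sm, hsm, rfl⟩
            exact hbd a (List.mem_cons_of_mem _ ha) (p, c) List.mem_cons_self
        have hbd' : ∀ x ∈ rest ++ ch, ∀ y ∈ rest ++ ch, x.2 ≤ y.2 + 1 := by
          intro a ha b hb
          rcases List.mem_append.1 ha with ha' | ha' <;>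
            rcases List.mem_append.1 hb with hb' | hb'
          · exact hbd a (List.mem_cons_of_mem _ ha') b (List.mem_cons_of_mem _ hb')
          · rcases hmem_ch b hb' with ⟨sm, hsm, rfl⟩
            have := hbd a (List.mem_cons_of_mem _ ha') (p, c) List.mem_cons_self
            simp only [] at this ⊢
            omega
          · rcases hmem_ch a ha' with ⟨sm, hsm, rfl⟩
            have := hrest_le b hb'
            simp only []
            omega
          · rcases hmem_ch a ha' with ⟨sm, hsm, rfl⟩
            rcases hmem_ch b hb' with ⟨sm2, hsm2, rfl⟩
            simp only []
            omega
        rw [ih (rest ++ ch) hmuQ' hP' hpw' hbd']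
        -- the queue value is preserved by the expansion
        congr 1
        rw [Vq_append, Vq_cons]
        have hVch : Vq strl tl ch = addO c (solMin strl tl p.length) := by
          unfold Vq
          rw [hch, List.map_map]
          rw [solMin_eq strl tl p.length hlt, addO_ominList, List.map_map]
          congr 1
          apply List.map_congr_left
          intro sm hsm
          simp only [Function.comp, contribV]
          rw [addO_addO, List.length_append]
        rw [hVch, omin_comm]
        rfl

-- ========== B side ==========

def tableT (strl : List (List Char)) (tl : List Char) (p : Nat) : List (Option Int) :=
  (List.range (tl.length - p + 1)).map (fun i => solMin strl tl (p + i))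

theorem tableT_cons (strl : List (List Char)) (tl : List Char) (p : Nat)
    (h : p < tl.length) :
    tableT strl tl p = solMin strl tl p :: tableT strl tl (p + 1) := by
  unfold tableT
  have h1 : tl.length - p + 1 = (tl.length - (p+1) + 1) + 1 := by omega
  rw [h1, List.range_succ_eq_map]
  simp only [List.map_cons, Nat.add_zero, List.map_map]
  congr 1
  apply List.map_congr_left
  intro i _
  simp only [Function.comp]
  congr 1
  omega

-- one iteration of B's outer loop turns the table for p+1 into the table for p
theorem stepB_eq (strl : List (List Char)) (tl : List Char) (p : Nat)
    (h : p < tl.length) :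
    (strl.foldl
      (fun (b : Option Int) s =>
        let k : Int := (s.length : Int)
        if 1 ≤ k ∧ k ≤ (tl.length : Int) - (p : Int) ∧
            PySem.List.slice tl (some (p : Int)) (some ((p : Int) + k)) = s then
          match PySem.List.pyGetD (tableT strl tl (p + 1)) (k - 1) none with
          | some r =>
            match b with
            | none => some (r + 1)
            | some bv => if r + 1 < bv then some (r + 1) else some bv
          | none => b
        else b)
      none) = solMin strl tl p := by
  have hT : ∀ k : Nat, 1 ≤ k → k ≤ tl.length - p →
      PySem.List.pyGetD (tableT strl tl (p + 1)) ((k : Int) - 1) none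
        = solMin strl tl (p + k) := by
    intro k hk1 hk2
    have hcast : (k : Int) - 1 = ((k - 1 : Nat) : Int) := by omega
    rw [hcast, PySem.List.pyGetD_natCast]
    unfold tableT
    rw [List.getD_eq_getElem?_getD, List.getElem?_map, List.getElem?_range (by omega)]
    simp only [Option.map_some, Option.getD_some]
    congr 1
    omega
  have hfun : (fun (b : Option Int) (s : List Char) =>
        let k : Int := (s.length : Int)
        if 1 ≤ k ∧ k ≤ (tl.length : Int) - (p : Int) ∧
            PySem.List.slice tl (some (p : Int)) (some ((p : Int) + k)) = s then
          match PySem.List.pyGetD (tableT strl tl (p + 1)) (k - 1) none with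
          | some r =>
            match b with
            | none => some (r + 1)
            | some bv => if r + 1 < bv then some (r + 1) else some bv
          | none => b
        else b)
      = (fun (b : Option Int) (s : List Char) =>
          if (!s.isEmpty && decide ((tl.drop p).take s.length = s)) = true
          then omin b (addO 1 (solMin strl tl (p + s.length))) else b) := by
    funext b s
    by_cases hm : (tl.drop p).take s.length = s
    · by_cases h0 : s = []
      · subst h0; simp
      · have hk1 : 1 ≤ s.length := List.length_pos_of_ne_nil h0
        have hkle : s.length ≤ tl.length - p := by
          have hlen := congrArg List.length hm
          simp only [List.length_take, List.length_drop] at hlen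
          omega
        simp only []
        rw [if_pos ⟨by exact_mod_cast hk1, by push_cast; omega,
          by rw [PySem.List.slice_natCast_add]; exact hm⟩]
        rw [if_pos (by simp [h0, hm]), hT s.length hk1 hkle]
        cases hsm : solMin strl tl (p + s.length) with
        | none => simp only [addO, Option.map_none, omin_none_right]
        | some r =>
          simp only [addO, Option.map_some]
          cases b with
          | none => simp [omin, Int.add_comm]
          | some bv =>
            simp only [omin]
            rw [min_def]
            split_ifs <;> first | rfl | (congr 1; omega) | (exfalso; omega)
    · simp only []
      rw [if_neg (by
        rintro ⟨-, -, hsl⟩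
        rw [PySem.List.slice_natCast_add] at hsl
        exact hm hsl)]
      rw [if_neg (by simp [hm])]
  rw [hfun, ← List.foldl_filter]
  rw [foldl_omin, solMin_eq _ _ _ h]
  rfl

theorem loopB_eq (strl : List (List Char)) (tl : List Char) :
    ∀ p : Nat, p < tl.length →
      (PySem.List.pyRange (p : Int) (-1) (-1)).foldl
        (fun best pos =>
          (strl.foldl
            (fun (b : Option Int) s =>
              let k : Int := (s.length : Int)
              if 1 ≤ k ∧ k ≤ (tl.length : Int) - pos ∧
                  PySem.List.slice tl (some pos) (some (pos + k)) = s then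
                match PySem.List.pyGetD best (k - 1) none with
                | some r =>
                  match b with
                  | none => some (r + 1)
                  | some bv => if r + 1 < bv then some (r + 1) else some bv
                | none => b
              else b)
            (none : Option Int)) :: best)
        (tableT strl tl (p + 1)) = tableT strl tl 0 := by
  intro p
  induction p with
  | zero =>
    intro h0
    rw [PySem.List.pyRange_neg_one_cons (by norm_num),
      PySem.List.pyRange_neg_one_eq_nil (by norm_num)]
    simp only [List.foldl_cons, List.foldl_nil]
    rw [stepB_eq _ _ _ h0]
    exact (tableT_cons _ _ 0 h0).symm
  | succ p ih =>
    intro h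
    rw [PySem.List.pyRange_neg_one_cons (by push_cast; omega)]
    simp only [List.foldl_cons]
    rw [stepB_eq _ _ _ h, ← tableT_cons _ _ (p + 1) h,
      show ((p + 1 : Nat) : Int) - 1 = (p : Int) by push_cast; ring]
    exact ih (by omega)

theorem alt_eq (strs : List String) (t : String) :
    solution_alt strs t = unO (solMin (strs.map String.toList) t.toList 0) := by
  rcases Nat.eq_zero_or_pos t.toList.length with h0 | hpos
  · simp only [solution_alt]
    rw [PySem.List.pyRange_neg_one_eq_nil (by omega)]
    simp only [List.foldl_nil, PySem.List.pyGetD_zero_cons]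
    rw [solMin, dif_neg (by omega)]
    rfl
  · simp only [solution_alt]
    rw [show ((t.toList.length : Int) - 1) = ((t.toList.length - 1 : Nat) : Int) by omega]
    rw [show ([some 0] : List (Option Int))
        = tableT (strs.map String.toList) t.toList ((t.toList.length - 1) + 1) by
      unfold tableT
      rw [show t.toList.length - 1 + 1 = t.toList.length by omega]
      rw [show t.toList.length - t.toList.length + 1 = 1 by omega]
      simp only [List.range_one, List.map_cons, List.map_nil]
      rw [solMin, dif_neg (by omega)]]
    rw [loopB_eq _ _ _ (by omega)]
    rw [tableT_cons _ _ 0 hpos]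
    simp only [PySem.List.pyGetD_zero_cons]
    cases solMin (strs.map String.toList) t.toList 0 <;> rfl

-- ===== VERDICT (by name: the statement is the Claim_ definition above) =====
theorem solution_spec : Claim_equal_solution := by
  intro strs t _ hpre
  unfold Spec_solution
  have hne : ∀ s ∈ strs.map String.toList, s ≠ [] := by
    intro s hs
    rcases List.mem_map.1 hs with ⟨str, hstr, rfl⟩
    intro h0
    apply hpre str hstr
    have h1 := congrArg String.ofList h0
    rwa [String.ofList_toList] at h1
  obtain ⟨m, hm_eq, hm⟩ := build_map (strs.map String.toList) hne
  rw [alt_eq]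
  unfold solution
  simp only []
  rw [hm_eq]
  show solBfs t.toList m (solTree (strs.map String.toList) t.toList 0) [([], 0)]
    = unO (solMin (strs.map String.toList) t.toList 0)
  rw [bfs_eq (strs.map String.toList) t.toList m hm hne
    (solTree (strs.map String.toList) t.toList 0) [([], 0)]
    (by simp [muQ])
    (by intro x hx; rcases List.mem_singleton.1 hx with rfl; exact List.nil_prefix)
    (List.pairwise_singleton _ _)
    (by intro x hx y hy
        rcases List.mem_singleton.1 hx with rfl
        rcases List.mem_singleton.1 hy with rfl
        omega)]
  congr 1
  rw [Vq_cons,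
    show Vq (strs.map String.toList) t.toList [] = none from rfl, omin_none_right]
  show addO 0 (solMin (strs.map String.toList) t.toList 0)
    = solMin (strs.map String.toList) t.toList 0
  cases solMin (strs.map String.toList) t.toList 0 <;> simp [addO]
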